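-- pv_equiv track=rewrite | github.com/Kaushik8511/Visualizer | MergeSort.py | getColorArray
-- ===== SOURCE A (Python) =====
-- def getColorArray(lenght, left, middle, right):
--     colorArray = []
--
--     for i in range(lenght):
--         if i >= left and i <= right:
--             if i <= middle:
--                 colorArray.append("#FF4500")
--             else:
--                 colorArray.append("#FFA500")
--         else:
--             colorArray.append("#FFEFD5")
--
--     return colorArray
-- ===== SOURCE B (Python) =====
-- def getColorArray(lenght, left, middle, right):
--     result = ["#FFEFD5"] * lenght
--     lo = max(left, 0)
--     hi = min(right, lenght - 1)
--     red_hi = min(middle, hi)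
--     if lo <= red_hi:
--         result[lo:red_hi + 1] = ["#FF4500"] * (red_hi - lo + 1)
--     org_lo = max(middle + 1, lo)
--     if org_lo <= hi:
--         result[org_lo:hi + 1] = ["#FFA500"] * (hi - org_lo + 1)
--     return result
-- ===== Notes on version B (the rewrite author's own statement) =====
-- stated objective: alternative
-- what changed: B allocates a background-filled array once and overwrites the two colored regions as contiguous slice assignments with clamped bounds, instead of A's per-index branch inside a loop over the whole range.
import Mathlib
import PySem

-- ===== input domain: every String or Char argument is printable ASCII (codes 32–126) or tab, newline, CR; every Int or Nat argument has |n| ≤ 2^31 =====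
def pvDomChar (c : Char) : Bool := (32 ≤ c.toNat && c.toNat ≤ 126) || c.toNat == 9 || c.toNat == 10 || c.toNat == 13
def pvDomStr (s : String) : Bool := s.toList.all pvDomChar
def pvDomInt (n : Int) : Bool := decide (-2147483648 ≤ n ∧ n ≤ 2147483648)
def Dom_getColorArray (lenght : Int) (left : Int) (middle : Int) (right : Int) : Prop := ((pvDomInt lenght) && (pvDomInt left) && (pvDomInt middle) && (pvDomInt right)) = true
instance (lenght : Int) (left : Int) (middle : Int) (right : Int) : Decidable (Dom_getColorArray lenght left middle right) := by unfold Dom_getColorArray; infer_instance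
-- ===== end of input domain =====

-- B builds the background-filled array once and overwrites the two colored regions as
-- contiguous slice assignments with clamped bounds (alternative decomposition, same cost).

-- ===== PORT A =====
def getColorArray (lenght : Int) (left : Int) (middle : Int) (right : Int) : List String :=
  (PySem.List.pyRange 0 lenght 1).foldl (fun colorArray i =>
    if left ≤ i ∧ i ≤ right then
      if i ≤ middle then colorArray ++ ["#FF4500"]
      else colorArray ++ ["#FFA500"]
    else colorArray ++ ["#FFEFD5"]) []

-- ===== PORT B =====
-- slice assignment result[a : b+1] = [c] * (b - a + 1), for clamped in-range bounds
def pvSliceAssign (xs : List String) (a b : Int) (c : String) : List String :=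
  xs.take a.toNat ++ List.replicate (b - a + 1).toNat c ++ xs.drop (b + 1).toNat

def getColorArray_alt (lenght : Int) (left : Int) (middle : Int) (right : Int) : List String :=
  let result0 := List.replicate lenght.toNat "#FFEFD5"
  let lo := max left 0
  let hi := min right (lenght - 1)
  let redHi := min middle hi
  let result1 := if lo ≤ redHi then pvSliceAssign result0 lo redHi "#FF4500" else result0
  let orgLo := max (middle + 1) lo
  if orgLo ≤ hi then pvSliceAssign result1 orgLo hi "#FFA500" else result1

-- ===== PRECONDITION & SPEC =====
def Spec_getColorArray (lenght : Int) (left : Int) (middle : Int) (right : Int) (out : List String) : Prop := out = getColorArray_alt lenght left middle right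
instance (lenght : Int) (left : Int) (middle : Int) (right : Int) (out : List String) : Decidable (Spec_getColorArray lenght left middle right out) := by unfold Spec_getColorArray; infer_instance

-- ===== CLAIM (what is proved, stated in full; the proofs are below) =====
def Claim_equal_getColorArray : Prop := ∀ (lenght : Int) (left : Int) (middle : Int) (right : Int), Dom_getColorArray lenght left middle right → Spec_getColorArray lenght left middle right (getColorArray lenght left middle right)

-- ===== LEMMAS AND PROOFS =====

-- the pointwise color rule
def pvColor (left middle right : Int) (k : Nat) : String :=
  if left ≤ (k : Int) ∧ (k : Int) ≤ right then
    (if (k : Int) ≤ middle then "#FF4500" else "#FFA500")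
  else "#FFEFD5"

theorem pvFlatMap_single {α β : Type} (g : α → β) (l : List α) :
    l.flatMap (fun k => [g k]) = l.map g := by
  induction l with
  | nil => rfl
  | cons x xs ih => simp [List.flatMap_cons, ih]

theorem getColorArray_eq_map (lenght left middle right : Int) :
    getColorArray lenght left middle right
      = (List.range lenght.toNat).map (pvColor left middle right) := by
  unfold getColorArray
  have hf : (fun (colorArray : List String) (i : Int) =>
      if left ≤ i ∧ i ≤ right then
        if i ≤ middle then colorArray ++ ["#FF4500"]
        else colorArray ++ ["#FFA500"]
      else colorArray ++ ["#FFEFD5"])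
      = fun colorArray i => colorArray ++
        [if left ≤ i ∧ i ≤ right then
          (if i ≤ middle then "#FF4500" else "#FFA500") else "#FFEFD5"] := by
    funext acc i; split_ifs <;> rfl
  rw [hf, PySem.List.foldl_append_eq_flatMap, PySem.List.pyRange_one, List.flatMap_map]
  rw [show (fun k : Nat => [if left ≤ ((0:Int) + k) ∧ ((0:Int) + k) ≤ right then
        (if ((0:Int) + k) ≤ middle then "#FF4500" else "#FFA500") else "#FFEFD5"])
      = fun k : Nat => [pvColor left middle right k] from by
    funext k; simp [pvColor]]
  rw [pvFlatMap_single]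
  simp

theorem getElem_pvSliceAssign (xs : List String) (a b : Int) (c : String)
    (ha : 0 ≤ a) (hab : a ≤ b) (hb : b < (xs.length : Int))
    (i : Nat) (hi1 : i < xs.length)
    (hi2 : i < (pvSliceAssign xs a b c).length) :
    (pvSliceAssign xs a b c)[i]
      = if a ≤ (i : Int) ∧ (i : Int) ≤ b then c else xs[i] := by
  unfold pvSliceAssign at hi2 ⊢
  have ht : (xs.take a.toNat).length = a.toNat := by simp; omega
  have hrep : (List.replicate (b - a + 1).toNat c).length = (b - a + 1).toNat := by simp
  by_cases h1 : i < (xs.take a.toNat ++ List.replicate (b - a + 1).toNat c).length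
  · rw [List.getElem_append_left h1]
    by_cases h1a : i < (xs.take a.toNat).length
    · rw [List.getElem_append_left h1a, List.getElem_take]
      have hc : ¬ (a ≤ (i : Int) ∧ (i : Int) ≤ b) := by rw [ht] at h1a; omega
      simp [hc]
    · rw [List.getElem_append_right (by omega), List.getElem_replicate]
      have hc : a ≤ (i : Int) ∧ (i : Int) ≤ b := by
        simp [ht, hrep] at h1 h1a; omega
      simp [hc]
  · rw [List.getElem_append_right (by omega), List.getElem_drop]
    have hc : ¬ (a ≤ (i : Int) ∧ (i : Int) ≤ b) := by
      simp [ht, hrep] at h1; omega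
    have hidx : (b + 1).toNat + (i - (xs.take a.toNat ++ List.replicate (b - a + 1).toNat c).length) = i := by
      simp [ht, hrep] at h1 ⊢; omega
    simp only [hc, if_false]
    congr 1

theorem length_pvSliceAssign (xs : List String) (a b : Int) (c : String)
    (ha : 0 ≤ a) (hab : a ≤ b) (hb : b < (xs.length : Int)) :
    (pvSliceAssign xs a b c).length = xs.length := by
  unfold pvSliceAssign
  simp [List.length_take, List.length_drop]
  omega

theorem pvSliceAssign_map_range (n : Nat) (f : Nat → String) (a b : Int) (c : String)
    (ha : 0 ≤ a) (hab : a ≤ b) (hb : b < (n : Int)) :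
    pvSliceAssign ((List.range n).map f) a b c
      = (List.range n).map (fun (k : Nat) => if a ≤ (k : Int) ∧ (k : Int) ≤ b then c else f k) := by
  have hlen : ((List.range n).map f).length = n := by simp
  apply List.ext_getElem
  · rw [length_pvSliceAssign _ _ _ _ ha hab (by simpa [hlen])]; simp
  · intro i hiL hiR
    rw [getElem_pvSliceAssign _ _ _ _ ha hab (by simpa [hlen]) i (by simpa [hlen] using hiR)]
    simp

theorem getColorArray_alt_eq_map (lenght left middle right : Int) :
    getColorArray_alt lenght left middle right
      = (List.range lenght.toNat).map (pvColor left middle right) := by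
  unfold getColorArray_alt
  dsimp only
  rw [show (List.replicate lenght.toNat "#FFEFD5")
      = (List.range lenght.toNat).map (fun (_ : Nat) => "#FFEFD5") from by simp]
  have hn1 : min middle (min right (lenght - 1)) < (lenght.toNat : Int) := by omega
  have hn2 : min right (lenght - 1) < (lenght.toNat : Int) := by omega
  by_cases h1 : max left 0 ≤ min middle (min right (lenght - 1)) <;>
    by_cases h2 : max (middle + 1) (max left 0) ≤ min right (lenght - 1)
  · rw [if_pos h1, pvSliceAssign_map_range _ _ _ _ _ (by omega) h1 hn1,
        if_pos h2, pvSliceAssign_map_range _ _ _ _ _ (by omega) h2 hn2]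
    apply List.map_congr_left
    intro k hk; rw [List.mem_range] at hk
    have hk' : (k : Int) < lenght := by omega
    unfold pvColor; split_ifs <;> first | rfl | omega
  · rw [if_pos h1, pvSliceAssign_map_range _ _ _ _ _ (by omega) h1 hn1, if_neg h2]
    apply List.map_congr_left
    intro k hk; rw [List.mem_range] at hk
    have hk' : (k : Int) < lenght := by omega
    unfold pvColor; split_ifs <;> first | rfl | omega
  · rw [if_neg h1, if_pos h2, pvSliceAssign_map_range _ _ _ _ _ (by omega) h2 hn2]
    apply List.map_congr_left
    intro k hk; rw [List.mem_range] at hk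
    have hk' : (k : Int) < lenght := by omega
    unfold pvColor; split_ifs <;> first | rfl | omega
  · rw [if_neg h1, if_neg h2]
    apply List.map_congr_left
    intro k hk; rw [List.mem_range] at hk
    have hk' : (k : Int) < lenght := by omega
    unfold pvColor; split_ifs <;> first | rfl | omega

-- ===== VERDICT (by name: the statement is the Claim_ definition above) =====
theorem getColorArray_spec : Claim_equal_getColorArray := by
  intro lenght left middle right _
  unfold Spec_getColorArray
  rw [getColorArray_eq_map, getColorArray_alt_eq_map]
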